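-- pv_equiv track=rewrite | github.com/nagutabby/i116-basic-of-programming-3 | billing.py | make_bill_item_list
-- ===== SOURCE A (Python) =====
-- def make_bill_item_list(catalog: dict[str, tuple[str, int]], cart: list[tuple[str, int]]) -> list[tuple[str, int, int]]:
--     bill_item_list: list[tuple[str, int, int]] = []
--     for i in range(len(cart)):
--         try:
--             ip = catalog[(cart[i])[0]]
--             bill_item_list = bill_item_list + [(ip[0], (cart[i])[1], ip[1] * (cart[i])[1])]
--         except KeyError:
--             return []
--
--     return bill_item_list
-- ===== SOURCE B (Python) =====
-- def make_bill_item_list(catalog: dict[str, tuple[str, int]], cart: list[tuple[str, int]]) -> list[tuple[str, int, int]]: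
--     if not all(item[0] in catalog for item in cart):
--         return []
--     return [(catalog[item[0]][0], item[1], catalog[item[0]][1] * item[1]) for item in cart]
-- ===== Notes on version B (the rewrite author's own statement) =====
-- stated objective: simpler
-- what changed: Replaces A's single interleaved loop with try/except early-return and repeated list re-concatenation by two separate passes: a membership validation pass returning [] up front, then one list comprehension building the bill.
import Mathlib
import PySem

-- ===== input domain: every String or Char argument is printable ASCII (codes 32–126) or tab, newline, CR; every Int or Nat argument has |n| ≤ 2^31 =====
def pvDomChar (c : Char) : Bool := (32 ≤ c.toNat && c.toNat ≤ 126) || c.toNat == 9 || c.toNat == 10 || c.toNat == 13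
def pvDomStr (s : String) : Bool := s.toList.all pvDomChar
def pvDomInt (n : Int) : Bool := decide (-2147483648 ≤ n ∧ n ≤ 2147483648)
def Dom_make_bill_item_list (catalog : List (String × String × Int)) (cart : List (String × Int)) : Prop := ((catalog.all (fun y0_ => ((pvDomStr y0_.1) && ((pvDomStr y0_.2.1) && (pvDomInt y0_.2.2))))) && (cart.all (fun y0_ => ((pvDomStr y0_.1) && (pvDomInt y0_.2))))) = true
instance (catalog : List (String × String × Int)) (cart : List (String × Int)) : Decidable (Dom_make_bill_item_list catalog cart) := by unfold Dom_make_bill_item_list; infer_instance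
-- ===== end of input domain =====

-- B: two passes (validate all keys, then build by comprehension) instead of A's
-- interleaved loop with try/except early-return and per-item list re-concatenation; objective: simpler.
-- dict lookup ported as first-match on the association list (the type convention's dict representation).
-- ===== PORT A =====
def pyLookup (catalog : List (String × String × Int)) (k : String) : Option (String × Int) :=
  (catalog.find? (fun p => p.1 == k)).map (·.2)

-- the loop of A: accumulator bill_item_list, early return [] on KeyError
def make_bill_item_list_go (catalog : List (String × String × Int)) (acc : List (String × Int × Int)) :
    List (String × Int) → List (String × Int × Int)
  | [] => acc
  | item :: rest =>
    match pyLookup catalog item.1 with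
    | none => []
    | some ip => make_bill_item_list_go catalog (acc ++ [(ip.1, item.2, ip.2 * item.2)]) rest

def make_bill_item_list (catalog : List (String × String × Int)) (cart : List (String × Int)) : List (String × Int × Int) :=
  make_bill_item_list_go catalog [] cart

-- ===== PORT B =====
def make_bill_item_list_alt (catalog : List (String × String × Int)) (cart : List (String × Int)) : List (String × Int × Int) :=
  if cart.all (fun item => (pyLookup catalog item.1).isSome) then
    cart.map (fun item =>
      match pyLookup catalog item.1 with
      | some ip => (ip.1, item.2, ip.2 * item.2)
      | none => ("", 0, 0))  -- unreachable under the guard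
  else []

-- ===== PRECONDITION & SPEC =====
def Spec_make_bill_item_list (catalog : List (String × String × Int)) (cart : List (String × Int)) (out : List (String × Int × Int)) : Prop := out = make_bill_item_list_alt catalog cart
instance (catalog : List (String × String × Int)) (cart : List (String × Int)) (out : List (String × Int × Int)) : Decidable (Spec_make_bill_item_list catalog cart out) := by unfold Spec_make_bill_item_list; infer_instance

-- ===== CLAIM (what is proved, stated in full; the proofs are below) =====
def Claim_equal_make_bill_item_list : Prop := ∀ (catalog : List (String × String × Int)) (cart : List (String × Int)), Dom_make_bill_item_list catalog cart → Spec_make_bill_item_list catalog cart (make_bill_item_list catalog cart)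

-- ===== LEMMAS AND PROOFS =====

-- ===== VERDICT (by name: the statement is the Claim_ definition above) =====
-- loop invariant: A's loop equals "validate then map", with the accumulator prepended
lemma go_eq (catalog : List (String × String × Int)) (cart : List (String × Int)) :
    ∀ acc, make_bill_item_list_go catalog acc cart =
      if cart.all (fun item => (pyLookup catalog item.1).isSome) then
        acc ++ cart.map (fun item =>
          match pyLookup catalog item.1 with
          | some ip => (ip.1, item.2, ip.2 * item.2)
          | none => ("", 0, 0))
      else [] := by
  induction cart with
  | nil => intro acc; simp [make_bill_item_list_go]
  | cons item rest ih =>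
    intro acc
    simp only [make_bill_item_list_go, List.all_cons, List.map_cons]
    cases h : pyLookup catalog item.1 with
    | none => simp
    | some ip =>
      simp only [Option.isSome_some, Bool.true_and]
      rw [ih]
      split <;> simp

theorem make_bill_item_list_spec : Claim_equal_make_bill_item_list := by
  intro catalog cart _
  unfold Spec_make_bill_item_list make_bill_item_list make_bill_item_list_alt
  rw [go_eq]
  simp
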